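-- pv_equiv track=rewrite | github.com/bartp1990/adventofcode | 2024/9/main.py | find_consecutive_free_space
-- ===== SOURCE A (Python) =====
-- def find_consecutive_free_space(blocks):
--     indices = []
--     start = None
--
--     for i in range(len(blocks)):
--         if blocks[i] == ".":
--             if start is None:
--                 start = i
--         else:
--             if start is not None:
--                 indices.append((start, i))
--                 start = None
--
--     if start is not None:
--         indices.append((start, len(blocks)))
--
--     return indices
-- ===== SOURCE B (Python) =====
-- def find_consecutive_free_space(blocks):
--     # run-splitting two-pointer scan: cut blocks into maximal runs of equal
--     # elements and emit the half-open interval of each '.' run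
--     res = []
--     pos = 0
--     n = len(blocks)
--     while pos < n:
--         j = pos
--         while j < n and blocks[j] == blocks[pos]:
--             j += 1
--         if blocks[pos] == ".":
--             res.append((pos, j))
--         pos = j
--     return res
-- ===== Notes on version B (the rewrite author's own statement) =====
-- stated objective: alternative
-- what changed: Replaced A's start-sentinel state machine (Optional start flag, appends on '.'->non-'.' transitions plus a trailing flush) by a run-splitting two-pointer scan that consumes each maximal run of equal blocks at once and emits (pos, j) directly for '.' runs.
import Mathlib
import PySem

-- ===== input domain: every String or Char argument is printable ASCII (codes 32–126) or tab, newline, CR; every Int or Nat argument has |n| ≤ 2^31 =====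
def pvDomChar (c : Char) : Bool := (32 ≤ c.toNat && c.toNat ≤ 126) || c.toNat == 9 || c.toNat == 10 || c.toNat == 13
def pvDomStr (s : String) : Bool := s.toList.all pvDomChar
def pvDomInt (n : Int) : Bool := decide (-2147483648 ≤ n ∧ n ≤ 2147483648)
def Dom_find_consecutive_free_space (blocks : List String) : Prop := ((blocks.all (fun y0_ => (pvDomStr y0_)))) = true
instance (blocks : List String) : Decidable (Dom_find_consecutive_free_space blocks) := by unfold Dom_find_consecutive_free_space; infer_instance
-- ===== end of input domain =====

-- B replaces A's start-sentinel state machine by a run-splitting two-pointer scan (alternative decomposition, same cost).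

-- ===== PORT A =====
-- loop body of A: update (indices, start) from (i, blocks[i])
def fcfsStep (st : List (Int × Int) × Option Int) (p : Int × String) : List (Int × Int) × Option Int :=
  if p.2 == "." then
    match st.2 with
    | none => (st.1, some p.1)
    | some _ => st
  else
    match st.2 with
    | some s => (st.1 ++ [(s, p.1)], none)
    | none => st

-- literal port of A: for i in range(len(blocks)) with state (indices, start), then the trailing flush
def find_consecutive_free_space (blocks : List String) : List (Int × Int) :=
  let n : Int := blocks.length
  let st := (PySem.List.pyRange 0 n 1).foldl
    (fun st i => fcfsStep st (i, PySem.List.pyGetD blocks i "")) ([], none)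
  match st.2 with
  | some s => st.1 ++ [(s, n)]
  | none => st.1

-- ===== PORT B =====
-- outer while loop of Source B: cut off the maximal run equal to the head (the inner while), emit if it is '.'
def fcfsRuns : List String → Int → List (Int × Int)
  | [], _ => []
  | x :: xs, pos =>
    let grp := xs.takeWhile (fun y => y == x)
    let rest := xs.dropWhile (fun y => y == x)
    let j : Int := pos + 1 + grp.length
    if x == "." then (pos, j) :: fcfsRuns rest j
    else fcfsRuns rest j
termination_by l _ => l.length
decreasing_by
  all_goals simp only [List.length_cons]
  all_goals exact Nat.lt_succ_of_le (List.length_dropWhile_le _ _)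

def find_consecutive_free_space_alt (blocks : List String) : List (Int × Int) :=
  fcfsRuns blocks 0

-- ===== PRECONDITION & SPEC =====
def Spec_find_consecutive_free_space (blocks : List String) (out : List (Int × Int)) : Prop := out = find_consecutive_free_space_alt blocks
instance (blocks : List String) (out : List (Int × Int)) : Decidable (Spec_find_consecutive_free_space blocks out) := by unfold Spec_find_consecutive_free_space; infer_instance

-- ===== CLAIM (what is proved, stated in full; the proofs are below) =====
def Claim_equal_find_consecutive_free_space : Prop := ∀ (blocks : List String), Dom_find_consecutive_free_space blocks → Spec_find_consecutive_free_space blocks (find_consecutive_free_space blocks)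

-- ===== LEMMAS AND PROOFS =====

-- A's state machine as structural recursion on the list (index carried explicitly)
def fcfsEmit : List String → Int → Option Int → List (Int × Int)
  | [], _, none => []
  | [], i, some s => [(s, i)]
  | b :: bs, i, st =>
    if b == "." then
      fcfsEmit bs (i + 1) (match st with | none => some i | some s => some s)
    else
      match st with
      | some s => (s, i) :: fcfsEmit bs (i + 1) none
      | none => fcfsEmit bs (i + 1) none

-- A's foldl over enumerate, finished by the trailing flush, equals the structural state machine
theorem fcfsEmit_eq_foldl (xs : List String) : ∀ (i : Int) (acc : List (Int × Int)) (st : Option Int),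
    (match ((PySem.List.enumerate xs i).foldl fcfsStep (acc, st)).2 with
     | some s => ((PySem.List.enumerate xs i).foldl fcfsStep (acc, st)).1 ++ [(s, i + xs.length)]
     | none => ((PySem.List.enumerate xs i).foldl fcfsStep (acc, st)).1)
    = acc ++ fcfsEmit xs i st := by
  induction xs with
  | nil =>
    intro i acc st
    cases st <;> simp [PySem.List.enumerate_nil, fcfsEmit]
  | cons b bs ih =>
    intro i acc st
    rw [PySem.List.enumerate_cons]
    simp only [List.foldl_cons, List.length_cons]
    have hcast : i + ((bs.length + 1 : Nat) : Int) = (i + 1) + (bs.length : Int) := by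
      push_cast; ring
    rw [hcast]
    by_cases hb : (b == ".") = true
    · cases st with
      | none =>
        rw [show fcfsStep (acc, none) (i, b) = (acc, some i) by simp [fcfsStep, hb],
            show fcfsEmit (b :: bs) i none = fcfsEmit bs (i + 1) (some i) by
              simp [fcfsEmit, hb]]
        exact ih (i + 1) acc (some i)
      | some s =>
        rw [show fcfsStep (acc, some s) (i, b) = (acc, some s) by simp [fcfsStep, hb],
            show fcfsEmit (b :: bs) i (some s) = fcfsEmit bs (i + 1) (some s) by
              simp [fcfsEmit, hb]]
        exact ih (i + 1) acc (some s)
    · cases st with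
      | none =>
        rw [show fcfsStep (acc, none) (i, b) = (acc, none) by simp [fcfsStep, hb],
            show fcfsEmit (b :: bs) i none = fcfsEmit bs (i + 1) none by
              simp [fcfsEmit, hb]]
        exact ih (i + 1) acc none
      | some s =>
        rw [show fcfsStep (acc, some s) (i, b) = (acc ++ [(s, i)], none) by simp [fcfsStep, hb],
            show fcfsEmit (b :: bs) i (some s) = (s, i) :: fcfsEmit bs (i + 1) none by
              simp [fcfsEmit, hb]]
        rw [ih (i + 1) (acc ++ [(s, i)]) none]
        simp

-- skipping a run of non-'.' blocks in state none
theorem fcfsEmit_skip_nondot (grp : List String) (h : ∀ y ∈ grp, ¬ (y == ".") = true) :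
    ∀ (rest : List String) (i : Int), fcfsEmit (grp ++ rest) i none = fcfsEmit rest (i + grp.length) none := by
  induction grp with
  | nil => intro rest i; simp
  | cons g gs ih =>
    intro rest i
    have hg : ¬ (g == ".") = true := h g (by simp)
    rw [List.cons_append,
        show fcfsEmit (g :: (gs ++ rest)) i none = fcfsEmit (gs ++ rest) (i + 1) none by
          simp [fcfsEmit, hg]]
    rw [ih (fun y hy => h y (by simp [hy])) rest (i + 1)]
    push_cast [List.length_cons]
    ring_nf

-- skipping a run of '.' blocks in state some s
theorem fcfsEmit_skip_dot (grp : List String) (h : ∀ y ∈ grp, (y == ".") = true) :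
    ∀ (rest : List String) (i s : Int), fcfsEmit (grp ++ rest) i (some s) = fcfsEmit rest (i + grp.length) (some s) := by
  induction grp with
  | nil => intro rest i s; simp
  | cons g gs ih =>
    intro rest i s
    have hg : (g == ".") = true := h g (by simp)
    rw [List.cons_append,
        show fcfsEmit (g :: (gs ++ rest)) i (some s) = fcfsEmit (gs ++ rest) (i + 1) (some s) by
          simp [fcfsEmit, hg]]
    rw [ih (fun y hy => h y (by simp [hy])) rest (i + 1)]
    push_cast [List.length_cons]
    ring_nf

-- main: A's state machine started in the none state equals B's run splitter
theorem fcfsEmit_eq_runs : ∀ (n : Nat) (xs : List String), xs.length ≤ n → ∀ (i : Int),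
    fcfsEmit xs i none = fcfsRuns xs i := by
  intro n
  induction n with
  | zero =>
    intro xs hxs i
    have : xs = [] := List.eq_nil_of_length_eq_zero (Nat.le_zero.mp hxs)
    subst this; simp [fcfsEmit, fcfsRuns]
  | succ n ih =>
    intro xs hxs i
    cases xs with
    | nil => simp [fcfsEmit, fcfsRuns]
    | cons x l =>
      have hx := List.takeWhile_append_dropWhile (p := fun y => y == x) (l := l)
      have hgrp : ∀ y ∈ l.takeWhile (fun y => y == x), (y == x) = true :=
        fun y hy => List.mem_takeWhile_imp (p := fun z => z == x) hy
      have hlen : (l.dropWhile (fun y => y == x)).length ≤ l.length := List.length_dropWhile_le _ _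
      have hln : l.length ≤ n := by simpa using Nat.lt_succ_iff.mp (Nat.lt_of_lt_of_le (by simp) hxs)
      by_cases hdot : (x == ".") = true
      · have hxeq : x = "." := by simpa using hdot
        have hdots : ∀ y ∈ l.takeWhile (fun y => y == x), (y == ".") = true := by
          intro y hy
          have : y = x := by simpa using hgrp y hy
          rw [this]; exact hdot
        have hskip := fcfsEmit_skip_dot _ hdots (l.dropWhile (fun y => y == x)) (i + 1) i
        rw [hx] at hskip
        rw [show fcfsEmit (x :: l) i none = fcfsEmit l (i + 1) (some i) by
              simp [fcfsEmit, hdot],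
            hskip, fcfsRuns]
        simp only [hdot, if_pos]
        cases hr : l.dropWhile (fun y => y == x) with
        | nil => simp [fcfsEmit, fcfsRuns]
        | cons a r =>
          have ha : ¬ (a == x) = true := by
            have h2 : l.dropWhile (fun y => y == x) ≠ [] := by simp [hr]
            have := List.head_dropWhile_not (p := fun y => y == x) (l := l) h2
            simpa [hr] using this
          have haN : ¬ (a == ".") = true := by rw [hxeq] at ha; exact ha
          rw [show fcfsEmit (a :: r) (i + 1 + ((l.takeWhile fun y => y == x)).length) (some i) =
              (i, i + 1 + ((l.takeWhile fun y => y == x)).length) ::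
                fcfsEmit r ((i + 1 + ((l.takeWhile fun y => y == x)).length) + 1) none by
            simp [fcfsEmit, haN]]
          have hr2 : r.length ≤ n := by
            have h1 : (a :: r).length ≤ l.length := hr ▸ hlen
            simp only [List.length_cons] at h1
            omega
          -- peel one more run for the r side
          have hgrp2 : ∀ y ∈ r.takeWhile (fun y => y == a), ¬ (y == ".") = true := by
            intro y hy
            have hya : y = a := by simpa using List.mem_takeWhile_imp (p := fun z => z == a) hy
            rw [hya]; exact haN
          have hx2 := List.takeWhile_append_dropWhile (p := fun y => y == a) (l := r)
          have hskip2 := fcfsEmit_skip_nondot _ hgrp2 (r.dropWhile (fun y => y == a))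
            ((i + 1 + ((l.takeWhile fun y => y == x)).length) + 1)
          rw [hx2] at hskip2
          rw [hskip2, ih _ (le_trans (List.length_dropWhile_le _ _) hr2), fcfsRuns]
          simp only [haN, if_neg, Bool.false_eq_true, not_false_iff]
      · have hnd : ∀ y ∈ l.takeWhile (fun y => y == x), ¬ (y == ".") = true := by
          intro y hy
          have hyx : y = x := by simpa using hgrp y hy
          rw [hyx]; exact hdot
        have hskip := fcfsEmit_skip_nondot _ hnd (l.dropWhile (fun y => y == x)) (i + 1)
        rw [hx] at hskip
        rw [show fcfsEmit (x :: l) i none = fcfsEmit l (i + 1) none by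
              simp [fcfsEmit, hdot],
            hskip, ih _ (le_trans hlen hln), fcfsRuns]
        simp only [hdot, if_neg, Bool.false_eq_true, not_false_iff]

-- port A as the structural state machine
theorem portA_eq_emit (blocks : List String) :
    find_consecutive_free_space blocks = fcfsEmit blocks 0 none := by
  simp only [find_consecutive_free_space]
  rw [← List.foldl_map (f := fun j => (j, PySem.List.pyGetD blocks j "")) (g := fcfsStep)]
  rw [show PySem.List.pyRange 0 (blocks.length : Int) 1 = PySem.List.pyRange 0 (PySem.List.len blocks) 1 by
        simp [PySem.List.len]]
  rw [← PySem.List.enumerate_eq_map_pyRange]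
  have h := fcfsEmit_eq_foldl blocks 0 [] none
  simpa using h

-- ===== VERDICT (by name: the statement is the Claim_ definition above) =====
theorem find_consecutive_free_space_spec : Claim_equal_find_consecutive_free_space := by
  intro blocks _
  unfold Spec_find_consecutive_free_space find_consecutive_free_space_alt
  rw [portA_eq_emit]
  exact fcfsEmit_eq_runs blocks.length blocks le_rfl 0
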